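-- pv_equiv track=rewrite | github.com/OpenEnergyPlatform/oeo-tools | oekg_evaluation/oekgQuery.py | duplicateFilter
-- ===== SOURCE A (Python) =====
-- def duplicateFilter(subjects, objects): #input: lists of subjects and objects, output: list of unique subjects and list of grouped objects
--     i = 0
--     subjectsFilter = []
--     objectFilter = []
--     for x in subjects:
--         if x not in subjectsFilter:
--             subjectsFilter.append(x)
--             objectFilter.append(objects[i])
--         else: #add object on the same position as first instance of subject
--             objectFilter[subjectsFilter.index(x)] = objectFilter[subjectsFilter.index(x)] + ", " + objects[i]
--         i = i + 1
--     return subjectsFilter, objectFilter #return list of both lists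
-- ===== SOURCE B (Python) =====
-- def duplicateFilter(subjects, objects):
--     # Two staged passes instead of A's single incremental-grouping loop:
--     # pass 1 builds the ordered list of unique subjects; pass 2 regroups by
--     # walking, for each unique subject, its chain of occurrence positions in
--     # the full subjects list (via list.index with a start offset) and joining
--     # the objects found there once.
--     seen = set()
--     subjectsFilter = []
--     for x in subjects:
--         if x not in seen:
--             seen.add(x)
--             subjectsFilter.append(x)
--     objectFilter = []
--     for x in subjectsFilter:
--         matched = []
--         i = subjects.index(x)
--         while True:
--             matched.append(objects[i])
--             try:
--                 i = subjects.index(x, i + 1)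
--             except ValueError:
--                 break
--         objectFilter.append(", ".join(matched))
--     return subjectsFilter, objectFilter
-- ===== Notes on version B (the rewrite author's own statement) =====
-- stated objective: alternative
-- what changed: A's single incremental-grouping loop (append-or-patch the joined string in place via subjectsFilter.index) is replaced by two staged passes: first build the ordered unique-subject list, then for each unique subject walk its chain of occurrence positions in the input (list.index with a start offset) and join the objects found there once.
import Mathlib
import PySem

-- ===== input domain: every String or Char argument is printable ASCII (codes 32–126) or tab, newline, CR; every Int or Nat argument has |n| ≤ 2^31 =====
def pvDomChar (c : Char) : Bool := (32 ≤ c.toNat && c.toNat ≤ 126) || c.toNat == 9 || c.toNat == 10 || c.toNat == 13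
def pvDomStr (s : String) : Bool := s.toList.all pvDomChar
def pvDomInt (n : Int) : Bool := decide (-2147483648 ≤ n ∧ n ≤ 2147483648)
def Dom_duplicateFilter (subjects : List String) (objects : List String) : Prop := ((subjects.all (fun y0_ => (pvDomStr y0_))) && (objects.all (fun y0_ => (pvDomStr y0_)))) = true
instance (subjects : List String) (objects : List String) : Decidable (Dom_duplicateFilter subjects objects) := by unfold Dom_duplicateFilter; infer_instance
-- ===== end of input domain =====

-- B replaces A's single incremental-grouping loop by two staged passes: first build the ordered
-- list of unique subjects, then for each unique subject walk its chain of occurrence positions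
-- (list.index with a start offset) and join its objects once (alternative decomposition).

-- ===== PORT A =====
def duplicateFilter (subjects : List String) (objects : List String) : List String × List String :=
  let st := subjects.foldl
    (fun (st : Int × List String × List String) x =>
      if x ∉ st.2.1 then
        (st.1 + 1, st.2.1 ++ [x], st.2.2 ++ [(PySem.List.pyGet? objects st.1).getD ""])
      else
        let j := (PySem.List.index? st.2.1 x).getD 0
        (st.1 + 1, st.2.1,
          st.2.2.set j ((st.2.2.getD j "") ++ ", " ++ (PySem.List.pyGet? objects st.1).getD "")))
    (0, [], [])
  (st.2.1, st.2.2)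

-- ===== PORT B =====
-- hand port of Python's 'subjects.index(x, start)' (exact: some i = the index, none = ValueError)
def pvIndexFrom (xs : List String) (x : String) (s : Nat) : Option Nat :=
  (PySem.List.index? (xs.drop s) x).map (· + s)

-- termination fact for the while-loop port below
theorem pvIndexFrom_bounds (xs : List String) (x : String) (s j : Nat)
    (h : pvIndexFrom xs x s = some j) : s ≤ j ∧ j < xs.length := by
  unfold pvIndexFrom at h
  rcases Option.map_eq_some_iff.mp h with ⟨k, hk, rfl⟩
  rcases PySem.List.getElem_of_index?_eq_some hk with ⟨hlt, _, _⟩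
  rw [List.length_drop] at hlt
  omega

-- port of B's 'while True: matched.append(objects[i]); i = subjects.index(x, i+1) / break'
def pvCollect (subjects objects : List String) (x : String) (i : Nat) : List String :=
  (PySem.List.pyGet? objects (i : Int)).getD "" ::
    (match h : pvIndexFrom subjects x (i + 1) with
     | some j => pvCollect subjects objects x j
     | none => [])
termination_by subjects.length - i
decreasing_by
  have hb := pvIndexFrom_bounds subjects x (i + 1) j h
  omega

def duplicateFilter_alt (subjects : List String) (objects : List String) : List String × List String :=
  -- pass 1: ordered unique subjects (seen-set + output list)
  let p1 := subjects.foldl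
    (fun (st : PySem.Set String × List String) x =>
      if PySem.Set.contains st.1 x then st else (PySem.Set.add st.1 x, st.2 ++ [x]))
    (PySem.Set.empty, [])
  -- pass 2: for each unique subject, walk its occurrence chain and join the objects found there
  let objectFilter := p1.2.map (fun x =>
    match pvIndexFrom subjects x 0 with
    | some i => PySem.Str.join ", " (pvCollect subjects objects x i)
    | none => "")   -- unreachable: every x in pass 1's output occurs in subjects
  (p1.2, objectFilter)

-- ===== PRECONDITION & SPEC =====
-- Pre_ excludes exactly the inputs where Python A raises IndexError: objects shorter than subjects.
def Pre_duplicateFilter (subjects : List String) (objects : List String) : Prop :=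
  subjects.length ≤ objects.length
instance (subjects : List String) (objects : List String) : Decidable (Pre_duplicateFilter subjects objects) := by unfold Pre_duplicateFilter; infer_instance
def pvWitness_duplicateFilter : List String × List String := (["a", "b", "a"], ["1", "2", "3"])

def Spec_duplicateFilter (subjects : List String) (objects : List String) (out : List String × List String) : Prop := out = duplicateFilter_alt subjects objects
instance (subjects : List String) (objects : List String) (out : List String × List String) : Decidable (Spec_duplicateFilter subjects objects out) := by unfold Spec_duplicateFilter; infer_instance

-- ===== CLAIM (what is proved, stated in full; the proofs are below) =====
def Claim_equal_duplicateFilter : Prop := ∀ (subjects : List String) (objects : List String), Dom_duplicateFilter subjects objects → Pre_duplicateFilter subjects objects → Spec_duplicateFilter subjects objects (duplicateFilter subjects objects)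

-- ===== LEMMAS AND PROOFS =====

-- The ordered list of unique subjects (shared characterisation of both ports' first components).
def pvUniq (p : List String) : List String :=
  p.foldl (fun acc x => if x ∉ acc then acc ++ [x] else acc) []

-- The group of x: the objects at indices whose subject equals x.
def pvMatched (subjects objects : List String) (x : String) : List String :=
  ((PySem.List.pyRange 0 (subjects.length : Int) 1).filter
      (fun i => (PySem.List.pyGet? subjects i).getD "" == x)).map
    (fun i => (PySem.List.pyGet? objects i).getD "")

def pvG (subjects objects : List String) (x : String) : String :=
  PySem.Str.join ", " (pvMatched subjects objects x)

-- The occurrence positions of x in subjects from position s on.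
def pvOccs (subjects : List String) (x : String) (s : Nat) : List Nat :=
  (List.range' s (subjects.length - s)).filter (fun i => (subjects[i]?.getD "" == x))

theorem pvIndexFrom_none (xs : List String) (x : String) (s : Nat)
    (h : pvIndexFrom xs x s = none) :
    ∀ i, s ≤ i → (hi : i < xs.length) → xs[i] ≠ x := by
  unfold pvIndexFrom at h
  rw [Option.map_eq_none_iff, PySem.List.index?_eq_none_iff] at h
  intro i hsi hi hx
  apply h
  rw [List.mem_iff_getElem?]
  refine ⟨i - s, ?_⟩
  rw [List.getElem?_drop, show s + (i - s) = i by omega, List.getElem?_eq_getElem hi, hx]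

theorem pvIndexFrom_some (xs : List String) (x : String) (s j : Nat)
    (h : pvIndexFrom xs x s = some j) :
    s ≤ j ∧ ∃ (hj : j < xs.length), xs[j] = x ∧
      ∀ i, s ≤ i → i < j → (hi : i < xs.length) → xs[i] ≠ x := by
  unfold pvIndexFrom at h
  rcases Option.map_eq_some_iff.mp h with ⟨k, hk, rfl⟩
  rcases PySem.List.getElem_of_index?_eq_some hk with ⟨hlt, heq, hmin⟩
  have hlen : k < xs.length - s := by rw [List.length_drop] at hlt; omega
  have hvs : xs[s + k]? = some x := by
    rw [← List.getElem?_drop, List.getElem?_eq_getElem hlt, heq]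
  refine ⟨by omega, by omega, ?_, ?_⟩
  · have hj : k + s < xs.length := by omega
    rw [← Option.some_inj, ← List.getElem?_eq_getElem hj, show k + s = s + k by omega]
    exact hvs
  · intro i hsi hij hi hx
    have hms : i - s < k := by omega
    have hms' : i - s < (xs.drop s).length := by rw [List.length_drop]; omega
    apply hmin (i - s) hms
    rw [← Option.some_inj, ← List.getElem?_eq_getElem hms']
    rw [List.getElem?_drop, show s + (i - s) = i by omega, List.getElem?_eq_getElem hi, hx]

-- the occurrence chain walked by pvCollect is exactly the filtered index range
theorem pvChain (subjects objects : List String) (x : String) :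
    ∀ (m s : Nat), subjects.length - s ≤ m →
      (match pvIndexFrom subjects x s with
       | some j => pvCollect subjects objects x j
       | none => ([] : List String))
      = (pvOccs subjects x s).map (fun i => (objects[i]?.getD "")) := by
  intro m
  induction m with
  | zero =>
    intro s hs
    have hsl : subjects.length ≤ s := by omega
    have hnone : pvIndexFrom subjects x s = none := by
      unfold pvIndexFrom
      rw [List.drop_eq_nil_of_le hsl]
      rfl
    rw [hnone]
    unfold pvOccs
    rw [show subjects.length - s = 0 by omega]
    simp
  | succ m ih =>
    intro s hs
    cases h : pvIndexFrom subjects x s with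
    | none =>
      have hnone := pvIndexFrom_none subjects x s h
      unfold pvOccs
      rw [List.filter_eq_nil_iff.mpr, List.map_nil]
      intro i hi
      rw [List.mem_range'_1] at hi
      have hil : i < subjects.length := by omega
      rw [List.getElem?_eq_getElem hil]
      simpa using hnone i hi.1 hil
    | some j =>
      rcases pvIndexFrom_some subjects x s j h with ⟨hsj, hj, hjx, hmin⟩
      -- split the occurrence list at j
      have hocc : pvOccs subjects x s = j :: pvOccs subjects x (j + 1) := by
        unfold pvOccs
        have hsplit : List.range' s (subjects.length - s)
            = List.range' s (j - s) ++ List.range' j (subjects.length - j) := by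
          have := List.range'_append (s := s) (m := j - s) (n := subjects.length - j) (step := 1)
          simp only [one_mul] at this
          rw [show s + (j - s) = j by omega] at this
          rw [show subjects.length - s = (j - s) + (subjects.length - j) by omega]
          exact this.symm
        rw [hsplit, List.filter_append]
        have h1 : (List.range' s (j - s)).filter (fun i => (subjects[i]?.getD "" == x)) = [] := by
          rw [List.filter_eq_nil_iff]
          intro i hi
          rw [List.mem_range'_1] at hi
          have hil : i < subjects.length := by omega
          rw [List.getElem?_eq_getElem hil]
          simpa using hmin i hi.1 (by omega) hil
        have h2 : List.range' j (subjects.length - j) = j :: List.range' (j + 1) (subjects.length - (j + 1)) := by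
          rw [show subjects.length - j = (subjects.length - (j + 1)) + 1 by omega, List.range'_succ]
        rw [h1, h2, List.nil_append, List.filter_cons]
        rw [List.getElem?_eq_getElem hj]
        simp [hjx]
      rw [hocc, List.map_cons]
      show pvCollect subjects objects x j = _
      rw [pvCollect.eq_def]
      congr 1
      · rw [PySem.List.pyGet?_natCast]
      · have := ih (j + 1) (by omega)
        rw [← this]
        cases h2 : pvIndexFrom subjects x (j + 1) <;> simp [h2]

-- pass 1 of B computes pvUniq (the seen-set mirrors the output list's membership)
theorem pvPass1 (p : List String) :
    ∀ (st : PySem.Set String) (l : List String), (∀ a, a ∈ st ↔ a ∈ l) →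
      (p.foldl
        (fun (st : PySem.Set String × List String) x =>
          if PySem.Set.contains st.1 x then st else (PySem.Set.add st.1 x, st.2 ++ [x]))
        (st, l)).2
      = p.foldl (fun acc x => if x ∉ acc then acc ++ [x] else acc) l := by
  induction p with
  | nil => intro st l _; rfl
  | cons x t ih =>
    intro st l hinv
    simp only [List.foldl_cons]
    by_cases hx : x ∈ l
    · rw [if_pos ((PySem.Set.contains_iff _ _).mpr ((hinv x).mpr hx)), if_neg (by simpa using hx)]
      exact ih st l hinv
    · have hcs : PySem.Set.contains st x = false := by
        rw [Bool.eq_false_iff]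
        intro hc
        exact hx ((hinv x).mp ((PySem.Set.contains_iff _ _).mp hc))
      rw [hcs, if_neg (by simp), if_pos (by simpa using hx)]
      apply ih
      intro a
      rw [PySem.Set.mem_add, List.mem_append, List.mem_singleton, hinv a]

theorem pvMem_foldl_uniq (p : List String) :
    ∀ (acc : List String) (a : String),
      a ∈ p.foldl (fun acc x => if x ∉ acc then acc ++ [x] else acc) acc ↔ a ∈ acc ∨ a ∈ p := by
  induction p with
  | nil => intro acc a; simp
  | cons x t ih =>
    intro acc a
    simp only [List.foldl_cons]
    by_cases hx : x ∈ acc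
    · rw [if_neg (by simpa using hx)]
      rw [ih acc a]
      simp only [List.mem_cons]
      constructor
      · rintro (h | h)
        · exact Or.inl h
        · exact Or.inr (Or.inr h)
      · rintro (h | rfl | h)
        · exact Or.inl h
        · exact Or.inl hx
        · exact Or.inr h
    · rw [if_pos (by simpa using hx)]
      rw [ih (acc ++ [x]) a]
      simp [or_assoc]

theorem pvMem_uniq (p : List String) (a : String) : a ∈ pvUniq p ↔ a ∈ p := by
  unfold pvUniq; rw [pvMem_foldl_uniq]; simp

-- pvMatched in Nat-indexed form
theorem pvMatched_eq_occs (subjects objects : List String) (x : String) :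
    pvMatched subjects objects x = (pvOccs subjects x 0).map (fun i => (objects[i]?.getD "")) := by
  unfold pvMatched pvOccs
  rw [PySem.List.pyRange_one]
  have h1 : ((subjects.length : Int) - 0).toNat = subjects.length := by simp
  rw [h1, List.filter_map, List.map_map]
  have h2 : ((fun i => (PySem.List.pyGet? subjects i).getD "" == x) ∘ fun k : Nat => (0 : Int) + (k : Int))
      = (fun i : Nat => (subjects[i]?.getD "" == x)) := by
    funext k
    simp [PySem.List.pyGet?_natCast]
  have h3 : ((fun i => (PySem.List.pyGet? objects i).getD "") ∘ fun k : Nat => (0 : Int) + (k : Int))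
      = (fun i : Nat => (objects[i]?.getD "")) := by
    funext k
    simp [PySem.List.pyGet?_natCast]
  rw [h2, h3, Nat.sub_zero, List.range_eq_range']

-- B's port equals (pvUniq, map pvG)
theorem pvAltB_eq (subjects objects : List String) :
    duplicateFilter_alt subjects objects
      = (pvUniq subjects, (pvUniq subjects).map (pvG subjects objects)) := by
  unfold duplicateFilter_alt
  have h1 := pvPass1 subjects PySem.Set.empty [] (by intro a; rfl)
  refine Prod.ext (by exact h1) ?_
  dsimp only
  rw [h1]
  show _ = (pvUniq subjects).map (pvG subjects objects)
  apply List.map_congr_left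
  intro x hx
  have hxs : x ∈ subjects := (pvMem_uniq subjects x).mp hx
  have hsome : (PySem.List.index? (subjects.drop 0) x).isSome := by
    rw [List.drop_zero, PySem.List.index?_isSome_iff]
    exact hxs
  rcases Option.isSome_iff_exists.mp hsome with ⟨k, hk⟩
  have hj : pvIndexFrom subjects x 0 = some (k + 0) := by
    unfold pvIndexFrom
    rw [hk]
    rfl
  have hch := pvChain subjects objects x subjects.length 0 (by omega)
  rw [hj] at hch
  dsimp only at hch
  simp only [hj]
  rw [hch]
  unfold pvG
  rw [pvMatched_eq_occs]

-- ===== A-side lemmas (invariant of A's single fold) =====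

theorem pvNodup_foldl_uniq (p : List String) :
    ∀ (acc : List String), acc.Nodup →
      (p.foldl (fun acc x => if x ∉ acc then acc ++ [x] else acc) acc).Nodup := by
  induction p with
  | nil => intro acc h; simpa
  | cons x t ih =>
    intro acc h
    simp only [List.foldl_cons]
    by_cases hx : x ∈ acc
    · rw [if_neg (by simpa using hx)]; exact ih acc h
    · rw [if_pos (by simpa using hx)]
      apply ih
      have hdisj : List.Disjoint acc [x] := by
        intro b hb hbx
        exact hx ((List.mem_singleton.mp hbx) ▸ hb)
      exact List.Nodup.append h (List.nodup_singleton x) hdisj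

theorem pvNodup_uniq (p : List String) : (pvUniq p).Nodup :=
  pvNodup_foldl_uniq p [] List.nodup_nil

theorem pvUniq_append_singleton (p : List String) (s : String) :
    pvUniq (p ++ [s]) = if s ∉ pvUniq p then pvUniq p ++ [s] else pvUniq p := by
  unfold pvUniq
  rw [List.foldl_append]
  rfl

-- ", ".join over an appended last element.
theorem pvCharsJoinAppend (sep c : List Char) :
    ∀ (L : List (List Char)),
      PySem.Chars.join sep (L ++ [c])
        = if L = [] then c else PySem.Chars.join sep L ++ sep ++ c := by
  intro L
  induction L with
  | nil => simp [PySem.Chars.join_singleton]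
  | cons a t ih =>
    cases t with
    | nil =>
      simp [PySem.Chars.join_cons_cons, PySem.Chars.join_singleton]
    | cons b u =>
      simp only [List.cons_append, PySem.Chars.join_cons_cons]
      simp only [List.cons_append] at ih
      rw [ih]
      simp [List.append_assoc]

theorem pvJoinSingleton (x : String) : PySem.Str.join ", " [x] = x := by
  apply String.toList_inj.mp
  rw [PySem.Str.toList_join, List.map_singleton, PySem.Chars.join_singleton]

theorem pvJoinAppend (l : List String) (x : String) :
    PySem.Str.join ", " (l ++ [x])
      = if l = [] then x else PySem.Str.join ", " l ++ ", " ++ x := by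
  apply String.toList_inj.mp
  rw [PySem.Str.toList_join, List.map_append, List.map_singleton, pvCharsJoinAppend]
  by_cases hl : l = []
  · simp [hl]
  · have : l.map String.toList ≠ [] := by simpa using hl
    simp [hl, this, PySem.Str.toList_join]

theorem pvMatched_append (p objects : List String) (s x : String) :
    pvMatched (p ++ [s]) objects x
      = pvMatched p objects x
        ++ (if s == x then [(PySem.List.pyGet? objects (p.length : Int)).getD ""] else []) := by
  unfold pvMatched
  have hlen : ((p ++ [s]).length : Int) = (p.length : Int) + 1 := by
    simp
  rw [hlen, PySem.List.pyRange_one_succ_right (by positivity), List.filter_append, List.map_append]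
  congr 1
  · congr 1
    apply List.filter_congr
    intro i hi
    rcases PySem.List.mem_pyRange_one.mp hi with ⟨h0, hlt⟩
    rw [PySem.List.pyGet?_of_nonneg _ h0, PySem.List.pyGet?_of_nonneg _ h0]
    have hi' : i.toNat < p.length := by omega
    rw [List.getElem?_append_left hi']
  · have hgs : PySem.List.pyGet? (p ++ [s]) (p.length : Int) = some s := by
      exact PySem.List.pyGet?_append_length p ([] : List String) s
    simp only [List.filter_singleton, hgs, Option.getD_some]
    by_cases hs : s == x <;> simp [hs]

theorem pvMatched_nil_of_not_mem (p objects : List String) (s : String) (hs : s ∉ p) :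
    pvMatched p objects s = [] := by
  unfold pvMatched
  rw [List.filter_eq_nil_iff.mpr, List.map_nil]
  intro i hi
  rcases PySem.List.mem_pyRange_one.mp hi with ⟨h0, hlt⟩
  rw [PySem.List.pyGet?_of_nonneg _ h0]
  have hi' : i.toNat < p.length := by omega
  rw [List.getElem?_eq_getElem hi']
  simp only [Option.getD_some]
  intro h
  exact hs ((eq_of_beq h) ▸ List.getElem_mem hi')

theorem pvMatched_ne_nil_of_mem (p objects : List String) (s : String) (hs : s ∈ p) :
    pvMatched p objects s ≠ [] := by
  unfold pvMatched
  rcases List.getElem_of_mem hs with ⟨k, hk, hks⟩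
  have hmem : (k : Int) ∈ PySem.List.pyRange 0 (p.length : Int) 1 := by
    rw [PySem.List.mem_pyRange_one]
    constructor <;> [positivity; exact_mod_cast hk]
  have htest : ((PySem.List.pyGet? p (k : Int)).getD "" == s) = true := by
    rw [PySem.List.pyGet?_natCast, List.getElem?_eq_getElem hk]
    simp [hks]
  have : (k : Int) ∈ (PySem.List.pyRange 0 (p.length : Int) 1).filter
      (fun i => (PySem.List.pyGet? p i).getD "" == s) := List.mem_filter.mpr ⟨hmem, htest⟩
  simp only [ne_eq, List.map_eq_nil_iff]
  exact List.ne_nil_of_mem this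

theorem pvMap_set_of_nodup {α β : Type} [DecidableEq α] (s : α) (F G : α → β)
    (hFs : ∀ y, y ≠ s → F y = G y) :
    ∀ (l : List α) (j : Nat), l.Nodup → l[j]? = some s →
      l.map F = (l.map G).set j (F s) := by
  intro l
  induction l with
  | nil => intro j _ hj; simp at hj
  | cons a t ih =>
    intro j hnd hj
    cases j with
    | zero =>
      simp only [List.getElem?_cons_zero, Option.some_inj] at hj
      subst hj
      simp only [List.map_cons, List.set_cons_zero]
      congr 1
      apply List.map_congr_left
      intro y hy
      exact hFs y (fun h => (List.nodup_cons.mp hnd).1 (h ▸ hy))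
    | succ j =>
      simp only [List.getElem?_cons_succ] at hj
      have hst : s ∈ t := List.mem_of_getElem? hj
      simp only [List.map_cons, List.set_cons_succ]
      rw [hFs a (fun h => (List.nodup_cons.mp hnd).1 (h ▸ hst)),
        ih j (List.nodup_cons.mp hnd).2 hj]

-- The invariant of A's fold: after a prefix p, the state is
-- (p.length, unique subjects of p, their groups as computed from p).
theorem pvInvA (objects : List String) (p : List String) :
    p.foldl
      (fun (st : Int × List String × List String) x =>
        if x ∉ st.2.1 then
          (st.1 + 1, st.2.1 ++ [x], st.2.2 ++ [(PySem.List.pyGet? objects st.1).getD ""])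
        else
          let j := (PySem.List.index? st.2.1 x).getD 0
          (st.1 + 1, st.2.1,
            st.2.2.set j ((st.2.2.getD j "") ++ ", " ++ (PySem.List.pyGet? objects st.1).getD "")))
      (0, [], [])
    = ((p.length : Int), pvUniq p, (pvUniq p).map (pvG p objects)) := by
  induction p using List.reverseRecOn with
  | nil => simp [pvUniq]
  | append_singleton p s ih =>
    rw [List.foldl_append, ih]
    simp only [List.foldl_cons, List.foldl_nil]
    by_cases hs : s ∈ pvUniq p
    · -- update branch
      have hsp : s ∈ p := (pvMem_uniq p s).mp hs
      simp only [hs, not_true_eq_false, if_false]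
      rcases Option.isSome_iff_exists.mp ((PySem.List.index?_isSome_iff _ _).mpr hs) with ⟨j, hj⟩
      rcases PySem.List.getElem_of_index?_eq_some hj with ⟨hjlt, hjs, _⟩
      have hgetD : ((pvUniq p).map (pvG p objects)).getD j "" = pvG p objects s := by
        rw [List.getD_eq_getElem?_getD, List.getElem?_map, List.getElem?_eq_getElem hjlt]
        simp [hjs]
      have hG' : ∀ y, y ≠ s → pvG (p ++ [s]) objects y = pvG p objects y := by
        intro y hy
        unfold pvG
        rw [pvMatched_append]
        have : (s == y) = false := by simpa using fun h => hy h.symm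
        simp [this]
      have hG's : pvG (p ++ [s]) objects s
          = pvG p objects s ++ ", " ++ (PySem.List.pyGet? objects (p.length : Int)).getD "" := by
        unfold pvG
        rw [pvMatched_append]
        simp only [beq_self_eq_true, if_true]
        rw [pvJoinAppend]
        simp [pvMatched_ne_nil_of_mem p objects s hsp]
      have hset : ((pvUniq p).map (pvG (p ++ [s]) objects))
          = ((pvUniq p).map (pvG p objects)).set j (pvG (p ++ [s]) objects s) :=
        pvMap_set_of_nodup s _ _ hG' (pvUniq p) j (pvNodup_uniq p)
          (by rw [List.getElem?_eq_getElem hjlt, hjs])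
      rw [pvUniq_append_singleton]
      simp only [hs, not_true_eq_false, if_false]
      refine Prod.ext (by simp) (Prod.ext rfl ?_)
      dsimp only
      simp only [hj, Option.getD_some, hgetD]
      rw [hset, hG's]
    · -- fresh-subject branch
      have hsp : s ∉ p := fun h => hs ((pvMem_uniq p s).mpr h)
      simp only [hs, not_false_eq_true, if_true]
      rw [pvUniq_append_singleton]
      simp only [hs, not_false_eq_true, if_true]
      refine Prod.ext (by simp) (Prod.ext rfl ?_)
      dsimp only
      rw [List.map_append, List.map_singleton]
      congr 1
      · apply List.map_congr_left
        intro y hy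
        have hys : y ≠ s := fun h => hs (h ▸ hy)
        unfold pvG
        rw [pvMatched_append]
        have : (s == y) = false := by simpa using fun h => hys h.symm
        simp [this]
      · unfold pvG
        rw [pvMatched_append]
        simp only [beq_self_eq_true, if_true]
        rw [pvMatched_nil_of_not_mem p objects s hsp]
        simp [pvJoinSingleton]

-- ===== VERDICT (by name: the statement is the Claim_ definition above) =====
theorem duplicateFilter_spec : Claim_equal_duplicateFilter := by
  intro subjects objects _ _
  show duplicateFilter subjects objects = duplicateFilter_alt subjects objects
  rw [pvAltB_eq]
  unfold duplicateFilter
  rw [pvInvA]
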